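-- pv_equiv track=rewrite | github.com/Newbluecake/docx-mcp-server | src/docx_mcp_server/core/replacer.py | _pos_to_run_offset
-- ===== SOURCE A (Python) =====
-- from typing import List, Tuple
--
-- def _pos_to_run_offset(run_texts: List[str], pos: int) -> Tuple[int, int]:
--     """Map a flat string position to (run_index, offset_in_run)."""
--     acc = 0
--     for idx, text in enumerate(run_texts):
--         next_acc = acc + len(text)
--         if pos < next_acc:
--             return idx, pos - acc
--         acc = next_acc
--     # If position equals total length, place at end of last run
--     return len(run_texts) - 1, len(run_texts[-1])
-- ===== SOURCE B (Python) =====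
-- from typing import List, Tuple
-- from itertools import accumulate
-- from bisect import bisect_right
--
-- def _pos_to_run_offset(run_texts: List[str], pos: int) -> Tuple[int, int]:
--     """Map a flat string position to (run_index, offset_in_run)."""
--     ends = list(accumulate(len(t) for t in run_texts))
--     idx = bisect_right(ends, pos)
--     if idx == len(run_texts):
--         # position >= total length: place at end of last run
--         return len(run_texts) - 1, len(run_texts[-1])
--     start = ends[idx - 1] if idx > 0 else 0
--     return idx, pos - start
-- ===== Notes on version B (the rewrite author's own statement) =====
-- stated objective: alternative
-- what changed: Replaces the linear enumerate-and-accumulate scan with a prefix-sum list built once plus a bisect_right binary search for the target run index.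
import Mathlib
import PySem

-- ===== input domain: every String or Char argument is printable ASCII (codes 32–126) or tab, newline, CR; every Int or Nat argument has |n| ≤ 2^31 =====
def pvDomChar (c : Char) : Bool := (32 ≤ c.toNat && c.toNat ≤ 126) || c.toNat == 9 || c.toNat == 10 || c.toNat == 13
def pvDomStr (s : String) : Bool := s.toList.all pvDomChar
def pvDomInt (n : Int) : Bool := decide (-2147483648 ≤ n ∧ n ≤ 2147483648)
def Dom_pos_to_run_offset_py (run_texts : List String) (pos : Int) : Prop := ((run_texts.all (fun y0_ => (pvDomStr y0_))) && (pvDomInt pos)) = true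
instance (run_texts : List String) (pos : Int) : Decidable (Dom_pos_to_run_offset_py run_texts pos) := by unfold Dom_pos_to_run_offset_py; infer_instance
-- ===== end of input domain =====

-- B replaces A's linear enumerate-and-accumulate scan by a prefix-sum list plus a
-- bisect_right binary search for the run index (objective: alternative decomposition).

-- ===== PORT A =====
-- the for-loop of A: rest is the unscanned tail, idx the enumerate counter, acc the running total
def aGo (orig : List String) (pos : Int) : List String → Nat → Int → Int × Int
  | [], _, _ => ((orig.length : Int) - 1, PySem.Str.len (orig.getLastD ""))
  | t :: ts, idx, acc =>
      let next_acc := acc + PySem.Str.len t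
      if pos < next_acc then ((idx : Int), pos - acc)
      else aGo orig pos ts (idx + 1) next_acc

def pos_to_run_offset_py (run_texts : List String) (pos : Int) : Int × Int :=
  aGo run_texts pos run_texts 0 0

-- ===== PORT B =====
-- itertools.accumulate: running sums of a list, starting from a seed
def pvAccum (a : Int) : List Int → List Int
  | [] => []
  | x :: xs => (a + x) :: pvAccum (a + x) xs

-- bisect.bisect_right, transliterated: binary search on [lo, hi)
def pvBisectRight (l : List Int) (x : Int) (lo hi : Nat) : Nat :=
  if _h : lo < hi then
    let mid := (lo + hi) / 2
    if x < l.getD mid 0 then pvBisectRight l x lo mid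
    else pvBisectRight l x (mid + 1) hi
  else lo
termination_by hi - lo
decreasing_by all_goals omega

def pos_to_run_offset_py_alt (run_texts : List String) (pos : Int) : Int × Int :=
  let ends := pvAccum 0 (run_texts.map PySem.Str.len)
  let idx := pvBisectRight ends pos 0 ends.length
  if idx = run_texts.length then
    ((run_texts.length : Int) - 1, PySem.Str.len (run_texts.getLastD ""))
  else
    let start := if 0 < idx then ends.getD (idx - 1) 0 else 0
    ((idx : Int), pos - start)

-- ===== PRECONDITION & SPEC =====
-- Pre_ excludes only the empty list, on which A raises IndexError (run_texts[-1]).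
def Pre_pos_to_run_offset_py (run_texts : List String) (pos : Int) : Prop := run_texts ≠ []
instance (run_texts : List String) (pos : Int) : Decidable (Pre_pos_to_run_offset_py run_texts pos) := by unfold Pre_pos_to_run_offset_py; infer_instance

def pvWitness_pos_to_run_offset_py : List String × Int := (["ab", "c"], 2)

def Spec_pos_to_run_offset_py (run_texts : List String) (pos : Int) (out : Int × Int) : Prop := out = pos_to_run_offset_py_alt run_texts pos
instance (run_texts : List String) (pos : Int) (out : Int × Int) : Decidable (Spec_pos_to_run_offset_py run_texts pos out) := by unfold Spec_pos_to_run_offset_py; infer_instance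

-- ===== CLAIM (what is proved, stated in full; the proofs are below) =====
def Claim_equal_pos_to_run_offset_py : Prop := ∀ (run_texts : List String) (pos : Int), Dom_pos_to_run_offset_py run_texts pos → Pre_pos_to_run_offset_py run_texts pos → Spec_pos_to_run_offset_py run_texts pos (pos_to_run_offset_py run_texts pos)

-- ===== LEMMAS AND PROOFS =====

-- lengths list and its prefix sums
def pvLens (run_texts : List String) : List Int := run_texts.map PySem.Str.len
def pvS (run_texts : List String) (k : Nat) : Int := ((pvLens run_texts).take k).sum

-- characterization of the answer index: first index whose prefix-end exceeds x
def pvC (l : List Int) (x : Int) (r : Nat) : Prop :=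
  r ≤ l.length ∧ (∀ i, i < r → l.getD i 0 ≤ x) ∧ (r < l.length → x < l.getD r 0)

theorem pvAccum_length (a : Int) (l : List Int) : (pvAccum a l).length = l.length := by
  induction l generalizing a with
  | nil => rfl
  | cons x xs ih => simp [pvAccum, ih]

theorem pvAccum_getD (l : List Int) : ∀ (a : Int) (i : Nat), i < l.length →
    (pvAccum a l).getD i 0 = a + (l.take (i + 1)).sum := by
  induction l with
  | nil => intro a i h; simp at h
  | cons x xs ih =>
    intro a i h
    cases i with
    | zero => simp [pvAccum]
    | succ j =>
      have hj : j < xs.length := by simpa using h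
      simp only [pvAccum, List.getD, List.getElem?_cons_succ]
      have := ih (a + x) j hj
      simp only [List.getD] at this
      rw [this]
      simp [List.sum_cons]
      ring

theorem pvLens_nonneg (run_texts : List String) : ∀ y ∈ pvLens run_texts, 0 ≤ y := by
  intro y hy
  simp only [pvLens, List.mem_map] at hy
  obtain ⟨s, _, rfl⟩ := hy
  simp [PySem.Str.len_eq]

theorem pvS_mono (run_texts : List String) {i j : Nat} (h : i ≤ j) :
    pvS run_texts i ≤ pvS run_texts j := by
  have hpre : (pvLens run_texts).take i <+: (pvLens run_texts).take j := by
    have heq : (pvLens run_texts).take i = ((pvLens run_texts).take j).take i := by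
      rw [List.take_take]; congr 1; omega
    rw [heq]; exact List.take_prefix _ _
  obtain ⟨t, ht⟩ := hpre
  have hnn : 0 ≤ t.sum := by
    apply List.sum_nonneg
    intro y hy
    exact pvLens_nonneg run_texts y (List.mem_of_mem_take (ht ▸ List.mem_append_right _ hy))
  have h2 : pvS run_texts j = pvS run_texts i + t.sum := by
    simp [pvS, ← ht]
  omega

theorem pvEnds_getD (run_texts : List String) (i : Nat) (h : i < run_texts.length) :
    (pvAccum 0 (pvLens run_texts)).getD i 0 = pvS run_texts (i + 1) := by
  have : i < (pvLens run_texts).length := by simpa [pvLens] using h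
  rw [pvAccum_getD _ 0 i this]
  simp [pvS]

theorem pvEnds_mono (run_texts : List String) {i j : Nat} (hij : i ≤ j)
    (hj : j < run_texts.length) :
    (pvAccum 0 (pvLens run_texts)).getD i 0 ≤ (pvAccum 0 (pvLens run_texts)).getD j 0 := by
  rw [pvEnds_getD _ i (lt_of_le_of_lt hij hj), pvEnds_getD _ j hj]
  exact pvS_mono _ (by omega)

theorem pvS_succ (run_texts : List String) (i : Nat) (h : i < run_texts.length) :
    pvS run_texts (i + 1) = pvS run_texts i + (pvLens run_texts).getD i 0 := by
  have h' : i < (pvLens run_texts).length := by simpa [pvLens] using h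
  simp [pvS, List.sum_take_succ _ i h', List.getD_eq_getElem?_getD, List.getElem?_eq_getElem h']

-- binary-search correctness: pvBisectRight lands on the characterized index
theorem pvBisect_C (run_texts : List String) (x : Int) :
    ∀ (k lo hi : Nat), hi - lo ≤ k → lo ≤ hi → hi ≤ run_texts.length →
    (∀ i, i < lo → (pvAccum 0 (pvLens run_texts)).getD i 0 ≤ x) →
    (∀ i, hi ≤ i → i < run_texts.length → x < (pvAccum 0 (pvLens run_texts)).getD i 0) →
    pvC (pvAccum 0 (pvLens run_texts)) x (pvBisectRight (pvAccum 0 (pvLens run_texts)) x lo hi) := by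
  intro k
  induction k with
  | zero =>
    intro lo hi hk hlh hhn hlow hhigh
    have hlohi : lo = hi := by omega
    subst hlohi
    rw [pvBisectRight, dif_neg (lt_irrefl lo)]
    refine ⟨by simpa [pvAccum_length, pvLens] using hhn, hlow, ?_⟩
    intro hr
    exact hhigh lo le_rfl (by simpa [pvAccum_length, pvLens] using hr)
  | succ k ih =>
    intro lo hi hk hlh hhn hlow hhigh
    rw [pvBisectRight]
    by_cases h : lo < hi
    · simp only [dif_pos h]
      by_cases hx : x < (pvAccum 0 (pvLens run_texts)).getD ((lo + hi) / 2) 0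
      · simp only [if_pos hx]
        apply ih lo ((lo + hi) / 2) (by omega) (by omega) (by omega) hlow
        intro i hi1 hi2
        exact lt_of_lt_of_le hx (pvEnds_mono run_texts hi1 hi2)
      · simp only [if_neg hx]
        apply ih ((lo + hi) / 2 + 1) hi (by omega) (by omega) hhn _ hhigh
        intro i hi1
        push_neg at hx
        have hmid : (lo + hi) / 2 < run_texts.length := by omega
        exact le_trans (pvEnds_mono run_texts (by omega) hmid) hx
    · rw [dif_neg h]
      have hlohi : lo = hi := by omega
      subst hlohi
      refine ⟨by simpa [pvAccum_length, pvLens] using hhn, hlow, ?_⟩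
      intro hr
      exact hhigh lo le_rfl (by simpa [pvAccum_length, pvLens] using hr)

-- A's loop, run from position idx with the matching accumulator, stops at the characterized index r
theorem pvAGo_eq (orig : List String) (pos : Int) :
    ∀ (rest : List String) (idx : Nat) (r : Nat),
    rest = orig.drop idx → idx ≤ r → pvC (pvAccum 0 (pvLens orig)) pos r →
    aGo orig pos rest idx (pvS orig idx) =
      (if r = orig.length then ((orig.length : Int) - 1, PySem.Str.len (orig.getLastD ""))
       else ((r : Int), pos - pvS orig r)) := by
  intro rest
  induction rest with
  | nil =>
    intro idx r hdrop hir hC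
    have hn : orig.length ≤ idx := by
      by_contra h
      push_neg at h
      have := List.drop_eq_nil_iff.mp hdrop.symm
      omega
    obtain ⟨hrn, _, _⟩ := hC
    have hrlen : r = orig.length := by
      have : r ≤ orig.length := by simpa [pvAccum_length, pvLens] using hrn
      omega
    simp [aGo, hrlen]
  | cons t ts ih =>
    intro idx r hdrop hir hC
    have hidx : idx < orig.length := by
      by_contra h
      push_neg at h
      rw [List.drop_eq_nil_of_le h] at hdrop
      exact List.cons_ne_nil _ _ hdrop
    have hts : ts = orig.drop (idx + 1) := by
      have := congrArg (List.drop 1) hdrop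
      simpa [List.drop_drop] using this
    have h1 : orig[idx] :: orig.drop (idx + 1) = t :: ts := by
      rw [← List.drop_eq_getElem_cons hidx, ← hdrop]
    have htget : t = orig[idx] := by
      injection h1 with h _; exact h.symm
    have hlen : PySem.Str.len t = (pvLens orig).getD idx 0 := by
      rw [htget]
      simp [pvLens, List.getD_eq_getElem?_getD, List.getElem?_eq_getElem hidx]
    have hnext : pvS orig idx + PySem.Str.len t = pvS orig (idx + 1) := by
      rw [pvS_succ orig idx hidx, hlen]
    obtain ⟨hrn, hlow, hhigh⟩ := hC
    have hrle : r ≤ orig.length := by simpa [pvAccum_length, pvLens] using hrn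
    simp only [aGo]
    rw [hnext]
    by_cases hc : pos < pvS orig (idx + 1)
    · rw [if_pos hc]
      have hreq : r = idx := by
        by_contra hne
        have hlt : idx < r := by omega
        have := hlow idx hlt
        rw [pvEnds_getD orig idx hidx] at this
        omega
      subst hreq
      rw [if_neg (by omega)]
    · rw [if_neg hc]
      have hlt : idx + 1 ≤ r := by
        rcases Nat.lt_or_ge idx r with h | h
        · omega
        · exfalso
          have hreq : r = idx := by omega
          subst hreq
          have := hhigh (by simpa [pvAccum_length, pvLens] using hidx)
          rw [pvEnds_getD orig r hidx] at this
          omega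
      exact ih (idx + 1) r hts hlt ⟨hrn, hlow, hhigh⟩

-- ===== VERDICT (by name: the statement is the Claim_ definition above) =====
theorem pos_to_run_offset_py_spec : Claim_equal_pos_to_run_offset_py := by
  intro run_texts pos _ hpre
  unfold Spec_pos_to_run_offset_py pos_to_run_offset_py
  have hlen' : (pvAccum 0 (pvLens run_texts)).length = run_texts.length := by
    rw [pvAccum_length]; simp [pvLens]
  have halt : pos_to_run_offset_py_alt run_texts pos =
      (if pvBisectRight (pvAccum 0 (pvLens run_texts)) pos 0 ((pvAccum 0 (pvLens run_texts)).length) = run_texts.length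
       then ((run_texts.length : Int) - 1, PySem.Str.len (run_texts.getLastD ""))
       else ((pvBisectRight (pvAccum 0 (pvLens run_texts)) pos 0 ((pvAccum 0 (pvLens run_texts)).length) : Int),
         pos - (if 0 < pvBisectRight (pvAccum 0 (pvLens run_texts)) pos 0 ((pvAccum 0 (pvLens run_texts)).length)
                then (pvAccum 0 (pvLens run_texts)).getD (pvBisectRight (pvAccum 0 (pvLens run_texts)) pos 0 ((pvAccum 0 (pvLens run_texts)).length) - 1) 0
                else 0))) := rfl
  rw [halt]
  have hC : pvC (pvAccum 0 (pvLens run_texts)) pos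
      (pvBisectRight (pvAccum 0 (pvLens run_texts)) pos 0 ((pvAccum 0 (pvLens run_texts)).length)) := by
    apply pvBisect_C run_texts pos run_texts.length 0 ((pvAccum 0 (pvLens run_texts)).length)
      (by omega) (by omega) (by omega)
    · intro i hi; omega
    · intro i hi1 hi2; rw [hlen'] at hi1; omega
  set r := pvBisectRight (pvAccum 0 (pvLens run_texts)) pos 0 ((pvAccum 0 (pvLens run_texts)).length) with hr
  have hA := pvAGo_eq run_texts pos run_texts 0 r (by simp) (by omega) hC
  have hS0 : pvS run_texts 0 = 0 := by simp [pvS]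
  rw [hS0] at hA
  rw [hA]
  obtain ⟨hrn, _, _⟩ := hC
  have hrle : r ≤ run_texts.length := by rw [hlen'] at hrn; omega
  by_cases hcase : r = run_texts.length
  · rw [if_pos hcase, if_pos hcase]
  · rw [if_neg hcase, if_neg hcase]
    congr 1
    congr 1
    by_cases h0 : 0 < r
    · rw [if_pos h0, pvEnds_getD run_texts (r - 1) (by omega)]
      congr 1
      omega
    · rw [if_neg h0]
      have : r = 0 := by omega
      simp [this, pvS]
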